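-- pv_equiv track=rewrite | github.com/josiahadrineda/Daily-Coding-Problems | 172_WordConcatenationIndices.py | check
-- ===== SOURCE A (Python) =====
-- def check(s, words):
--     if not s:
--         return not words
--     else:
--         s_so_far = ''
--         for ind, char in enumerate(s):
--             s_so_far += char
--             if s_so_far in words:
--                 words.remove(s_so_far)
--                 if check(s[ind+1:], words):
--                     return True
--                 words.add(s_so_far)
--         return False
-- ===== SOURCE B (Python) =====
-- def check(s, words):
--     # Level-synchronous BFS over (position, remaining-words) states: one round
--     # per word, each round advances every surviving state past one matched word.
--     # Unlike the recursive DFS, it never mutates `words` (return value only).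
--     n = len(s)
--     states = {(0, frozenset(words))}
--     for _ in range(len(words)):
--         states = {(j, rem - {s[i:j]})
--                   for i, rem in states
--                   for j in range(i + 1, n + 1)
--                   if s[i:j] in rem}
--     return (n, frozenset()) in states
-- ===== Notes on version B (the rewrite author's own statement) =====
-- stated objective: alternative
-- what changed: B replaces A's recursive depth-first backtracking with in-place remove/re-add on the shared set by an iterative level-synchronous BFS: it runs one round per word, each round mapping the whole set of (position, frozenset-of-remaining-words) states to its successors, deduplicating states, and finally tests whether (len(s), empty frozenset) was reached; words is never mutated (return-value equivalence).
import Mathlib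
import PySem

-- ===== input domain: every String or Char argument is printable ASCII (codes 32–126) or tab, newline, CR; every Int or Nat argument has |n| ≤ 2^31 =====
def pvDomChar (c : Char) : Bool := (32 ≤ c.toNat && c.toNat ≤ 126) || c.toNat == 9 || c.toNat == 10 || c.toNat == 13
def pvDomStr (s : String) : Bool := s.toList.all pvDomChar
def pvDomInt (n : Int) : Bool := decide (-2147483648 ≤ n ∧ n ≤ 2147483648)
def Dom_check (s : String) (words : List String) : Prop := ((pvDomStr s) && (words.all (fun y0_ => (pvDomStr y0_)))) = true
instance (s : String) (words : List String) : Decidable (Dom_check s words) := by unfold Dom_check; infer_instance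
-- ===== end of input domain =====

-- B replaces A's recursive depth-first backtracking (with in-place remove/re-add on the shared set)
-- by an iterative level-synchronous BFS over (position, remaining-words) states, one round per word,
-- deduplicating states; return value only: the Python A mutates `words` in place (empties it on
-- success, restores it on failure), B never mutates it.

-- ===== PORT A =====
-- A works on s.toList; `pref` is the accumulated `s_so_far` as chars, `rem` the unscanned suffix.
mutual
-- the `for ind, char in enumerate(s): ...` loop of A
def checkScan (pref rem : List Char) (ws : PySem.Set String) : Bool :=
  match rem with
  | [] => false                                   -- loop exhausted: `return False`
  | c :: rest =>
    let p := String.ofList (pref ++ [c])          -- s_so_far += char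
    if PySem.Set.contains ws p then               -- if s_so_far in words
      -- words.remove(p): Set.discard is exact here, the guard guarantees p ∈ words (no KeyError)
      let ws' := PySem.Set.discard ws p
      if checkCore rest ws' then true             -- if check(s[ind+1:], words): return True
      else checkScan (pref ++ [c]) rest (PySem.Set.add ws' p)   -- words.add(s_so_far); next iteration
    else checkScan (pref ++ [c]) rest ws
termination_by (rem.length, 0)

def checkCore (cs : List Char) (ws : PySem.Set String) : Bool :=
  match cs with
  | [] => ws.isEmpty                              -- `if not s: return not words`
  | c :: rest => checkScan [] (c :: rest) ws
termination_by (cs.length, 1)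
end

def check (s : String) (words : List String) : Bool := checkCore s.toList words

-- ===== PORT B =====
-- Source B builds, one round per word, the set of states (j, rem) reachable from (i, rem') of the
-- previous round by matching one word rem' ∋ s[i:j] = p, rem = rem' - {p}.
-- Positions i, j are list indices 0 ≤ i < j ≤ len(s), so Nat is exact for them;
-- `range(i+1, n+1)` is List.range' (i+1) (n-i) (both empty when i ≥ n, exact on Nat);
-- s[i:j] with 0 ≤ i ≤ j is exactly (s.toList.drop i).take (j-i);
-- the frozensets `rem` and the state set are PySem.Sets (dedup by ==).
def pvStep (cs : List Char) (st : List (Nat × List String)) : List (Nat × List String) :=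
  st.foldl (fun acc ir =>
    (List.range' (ir.1 + 1) (cs.length - ir.1)).foldl (fun acc j =>
      let p := String.ofList ((cs.drop ir.1).take (j - ir.1))   -- s[i:j]
      if PySem.Set.contains ir.2 p then                         -- if s[i:j] in rem
        PySem.Set.add acc (j, PySem.Set.diff ir.2 [p])          -- collect (j, rem - {s[i:j]})
      else acc) acc) []

def check_alt (s : String) (words : List String) : Bool :=
  let cs := s.toList
  -- states = {(0, frozenset(words))}; for _ in range(len(words)): states = pvStep(states)
  let states := (List.range words.length).foldl (fun st _ => pvStep cs st)
                  [(0, PySem.Set.ofList words)]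
  PySem.Set.contains states (cs.length, ([] : List String))     -- (n, frozenset()) in states

-- ===== PRECONDITION & SPEC =====
-- `words` models a Python set, whose elements are always distinct (the type convention); Pre_ excludes
-- association lists with repeated words, which no Python set can produce and on which the two ports'
-- list-level set operations may drop different numbers of copies.
def Pre_check (_s : String) (words : List String) : Prop := words.Nodup
instance (s : String) (words : List String) : Decidable (Pre_check s words) := by unfold Pre_check; infer_instance
def pvWitness_check : String × List String := ("ab", ["a", "b"])

def Spec_check (s : String) (words : List String) (out : Bool) : Prop := out = check_alt s words
instance (s : String) (words : List String) (out : Bool) : Decidable (Spec_check s words out) := by unfold Spec_check; infer_instance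

-- ===== CLAIM (what is proved, stated in full; the proofs are below) =====
def Claim_equal_check : Prop := ∀ (s : String) (words : List String), Dom_check s words → Pre_check s words → Spec_check s words (check s words)

-- ===== LEMMAS AND PROOFS =====

-- proof-only device: the plain split-position recursion, a stepping stone between the two ports
def pvSplit (cs : List Char) (ws : PySem.Set String) : Bool :=
  if h : cs = [] then ws.isEmpty
  else
    (List.range cs.length).attach.any (fun k =>
      let p := String.ofList (cs.take (k.1 + 1))
      if PySem.Set.contains ws p then
        pvSplit (cs.drop (k.1 + 1)) (PySem.Set.diff ws [p])
      else false)
termination_by cs.length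
decreasing_by
  have hcs : 0 < cs.length := by
    cases cs with
    | nil => exact absurd rfl h
    | cons a l => simp
  simp only [List.length_drop]
  omega

theorem pv_contains_iff (ws : List String) (x : String) : PySem.Set.contains ws x = true ↔ x ∈ ws := by
  simp only [PySem.Set.contains]; simp

theorem pv_isEmpty_congr {ws ws' : List String} (h : ws.Perm ws') : ws.isEmpty = ws'.isEmpty := by
  have := h.length_eq
  rw [Bool.eq_iff_iff]
  simp only [List.isEmpty_iff_length_eq_zero]
  omega

theorem pv_contains_congr {ws ws' : List String} (h : ws.Perm ws') (x : String) :
    PySem.Set.contains ws x = PySem.Set.contains ws' x := by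
  simp only [PySem.Set.contains]
  rw [Bool.eq_iff_iff]
  simp [h.mem_iff]

theorem pv_add_congr {ws ws' : List String} (h : ws.Perm ws') (x : String) :
    (PySem.Set.add ws x).Perm (PySem.Set.add ws' x) := by
  simp only [PySem.Set.add, pv_contains_congr h x]
  split
  · exact h
  · exact h.append_right [x]

theorem pv_discard_congr {ws ws' : List String} (h : ws.Perm ws') (x : String) :
    (PySem.Set.discard ws x).Perm (PySem.Set.discard ws' x) := by
  simpa [PySem.Set.discard] using h.filter (fun y => !y == x)

-- after a failed branch A re-adds the removed word: up to permutation the set is restored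
theorem pv_restore_perm {ws : List String} {p : String} (hp : p ∈ ws) (hnd : ws.Nodup) :
    (PySem.Set.add (PySem.Set.discard ws p) p).Perm ws := by
  have hfe : PySem.Set.discard ws p = ws.erase p := by
    rw [hnd.erase_eq_filter p]; rfl
  have hnc : PySem.Set.contains (ws.erase p) p = false := by
    rw [Bool.eq_false_iff]
    intro h
    exact hnd.not_mem_erase ((pv_contains_iff _ _).1 h)
  rw [hfe]
  simp only [PySem.Set.add, hnc, Bool.false_eq_true, if_false]
  exact (List.perm_append_singleton p _).trans (List.perm_cons_erase hp).symm

-- both A-side functions depend on the word set only up to permutation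
theorem pv_cong_aux : ∀ n : Nat,
    (∀ (pref rem : List Char) (ws ws' : List String), rem.length ≤ n → ws.Perm ws' →
      checkScan pref rem ws = checkScan pref rem ws')
    ∧ (∀ (cs : List Char) (ws ws' : List String), cs.length ≤ n → ws.Perm ws' →
      checkCore cs ws = checkCore cs ws') := by
  intro n
  induction n with
  | zero =>
    constructor
    · intro pref rem ws ws' hle hp
      have : rem = [] := by cases rem <;> simp_all
      subst this; simp [checkScan]
    · intro cs ws ws' hle hp
      have : cs = [] := by cases cs <;> simp_all
      subst this
      simpa [checkCore] using pv_isEmpty_congr hp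
  | succ n ih =>
    have scanIH : ∀ (pref rem : List Char) (ws ws' : List String), rem.length ≤ n + 1 → ws.Perm ws' →
        checkScan pref rem ws = checkScan pref rem ws' := by
      intro pref rem ws ws' hle hp
      match rem with
      | [] => simp [checkScan]
      | c :: rest =>
        have hlen : rest.length ≤ n := by simpa using hle
        simp only [checkScan]
        rw [pv_contains_congr hp (String.ofList (pref ++ [c]))]
        by_cases hc : PySem.Set.contains ws' (String.ofList (pref ++ [c])) = true
        · rw [if_pos hc, if_pos hc]
          rw [ih.2 rest _ _ hlen (pv_discard_congr hp _)]
          by_cases hb : checkCore rest (PySem.Set.discard ws' (String.ofList (pref ++ [c]))) = true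
          · rw [if_pos hb, if_pos hb]
          · rw [if_neg hb, if_neg hb]
            exact ih.1 _ rest _ _ hlen (pv_add_congr (pv_discard_congr hp _) _)
        · rw [if_neg hc, if_neg hc]
          exact ih.1 _ rest _ _ hlen hp
    refine ⟨scanIH, ?_⟩
    intro cs ws ws' hle hp
    match cs with
    | [] => simpa [checkCore] using pv_isEmpty_congr hp
    | c :: rest =>
      simp only [checkCore]
      exact scanIH [] (c :: rest) ws ws' hle hp

theorem pv_cong_scan {ws ws' : List String} (pref rem : List Char) (h : ws.Perm ws') :
    checkScan pref rem ws = checkScan pref rem ws' :=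
  (pv_cong_aux rem.length).1 pref rem ws ws' le_rfl h

-- characterisation of A's loop: success iff some split point works
theorem pv_scan_iff (ws : List String) (hnd : ws.Nodup) :
    ∀ (rem pref : List Char),
      (checkScan pref rem ws = true ↔
        ∃ i, i < rem.length ∧ String.ofList (pref ++ rem.take (i + 1)) ∈ ws ∧
          checkCore (rem.drop (i + 1))
            (PySem.Set.discard ws (String.ofList (pref ++ rem.take (i + 1)))) = true) := by
  intro rem
  induction rem with
  | nil => intro pref; simp [checkScan]
  | cons c rest ih =>
    intro pref
    by_cases hc : PySem.Set.contains ws (String.ofList (pref ++ [c])) = true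
    · have hmem : String.ofList (pref ++ [c]) ∈ ws := (pv_contains_iff _ _).1 hc
      by_cases hb : checkCore rest (PySem.Set.discard ws (String.ofList (pref ++ [c]))) = true
      · have hT : checkScan pref (c :: rest) ws = true := by
          simp only [checkScan]; rw [if_pos hc, if_pos hb]
        rw [hT]
        constructor
        · intro _
          exact ⟨0, by simp, by simpa using hmem, by simpa using hb⟩
        · intro _; rfl
      · have hE : checkScan pref (c :: rest) ws =
            checkScan (pref ++ [c]) rest
              (PySem.Set.add (PySem.Set.discard ws (String.ofList (pref ++ [c])))
                (String.ofList (pref ++ [c]))) := by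
          simp only [checkScan]; rw [if_pos hc, if_neg hb]
        rw [hE, pv_cong_scan _ _ (pv_restore_perm hmem hnd), ih (pref ++ [c])]
        constructor
        · rintro ⟨j, hj, hm, hcr⟩
          exact ⟨j + 1, by simpa using Nat.succ_lt_succ hj, by simpa using hm, by simpa using hcr⟩
        · rintro ⟨i, hi, hm, hcr⟩
          match i with
          | 0 => exact absurd (by simpa using hcr) hb
          | j + 1 =>
            exact ⟨j, by simpa using Nat.lt_of_succ_lt_succ hi, by simpa using hm, by simpa using hcr⟩
    · have hmem' : String.ofList (pref ++ [c]) ∉ ws := fun h => hc ((pv_contains_iff _ _).2 h)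
      have hE : checkScan pref (c :: rest) ws = checkScan (pref ++ [c]) rest ws := by
        simp only [checkScan]; rw [if_neg hc]
      rw [hE, ih (pref ++ [c])]
      constructor
      · rintro ⟨j, hj, hm, hcr⟩
        exact ⟨j + 1, by simpa using Nat.succ_lt_succ hj, by simpa using hm, by simpa using hcr⟩
      · rintro ⟨i, hi, hm, hcr⟩
        match i with
        | 0 => exact absurd (by simpa using hm) hmem'
        | j + 1 =>
          exact ⟨j, by simpa using Nat.lt_of_succ_lt_succ hi, by simpa using hm, by simpa using hcr⟩

theorem pv_core_iff {cs : List Char} (hcs : cs ≠ []) (ws : List String) (hnd : ws.Nodup) :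
    checkCore cs ws = true ↔
      ∃ i, i < cs.length ∧ String.ofList (cs.take (i + 1)) ∈ ws ∧
        checkCore (cs.drop (i + 1)) (PySem.Set.discard ws (String.ofList (cs.take (i + 1)))) = true := by
  match cs with
  | [] => exact absurd rfl hcs
  | c :: rest =>
    simp only [checkCore]
    have := pv_scan_iff ws hnd (c :: rest) []
    simpa only [List.nil_append] using this

theorem pv_diff_eq_discard (ws : List String) (w : String) :
    PySem.Set.diff ws [w] = PySem.Set.discard ws w := by
  simp only [PySem.Set.diff, PySem.Set.discard]
  apply List.filter_congr
  intro x _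
  show (!List.contains [w] x) = (x != w)
  simp only [List.contains_cons, List.contains_nil, Bool.or_false, bne]

-- characterisation of pvSplit's step
theorem pv_alt_iff {cs : List Char} (hcs : cs ≠ []) (ws : List String) :
    pvSplit cs ws = true ↔
      ∃ i, i < cs.length ∧ String.ofList (cs.take (i + 1)) ∈ ws ∧
        pvSplit (cs.drop (i + 1)) (PySem.Set.diff ws [String.ofList (cs.take (i + 1))]) = true := by
  rw [pvSplit, dif_neg hcs, List.any_eq_true]
  dsimp only
  constructor
  · rintro ⟨⟨k, hk⟩, -, hb⟩
    rw [List.mem_range] at hk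
    split at hb
    · exact ⟨k, hk, (pv_contains_iff _ _).1 (by assumption), hb⟩
    · simp at hb
  · rintro ⟨i, hi, hm, hrec⟩
    refine ⟨⟨i, List.mem_range.2 hi⟩, List.mem_attach _ _, ?_⟩
    rw [if_pos ((pv_contains_iff _ _).2 hm)]
    exact hrec

-- A equals the split recursion
theorem pv_main : ∀ (n : Nat) (cs : List Char) (ws : List String), cs.length = n →
    ws.Nodup → checkCore cs ws = pvSplit cs ws := by
  intro n
  induction n using Nat.strong_induction_on with
  | _ n IH =>
    intro cs ws hlen hnd
    match cs with
    | [] => simp [checkCore, pvSplit]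
    | c :: rest =>
      have hcs : (c :: rest : List Char) ≠ [] := by simp
      rw [Bool.eq_iff_iff, pv_core_iff hcs ws hnd, pv_alt_iff hcs ws]
      constructor
      · rintro ⟨i, hi, hm, hrec⟩
        refine ⟨i, hi, hm, ?_⟩
        rw [pv_diff_eq_discard]
        rw [← IH ((c :: rest).length - (i + 1)) (by simp only [List.length_cons] at hlen hi ⊢; omega)
            (List.drop (i + 1) (c :: rest))
            (PySem.Set.discard ws (String.ofList ((c :: rest).take (i + 1))))
            (by simp) (hnd.filter _)]
        exact hrec
      · rintro ⟨i, hi, hm, hrec⟩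
        refine ⟨i, hi, hm, ?_⟩
        rw [pv_diff_eq_discard] at hrec
        rw [IH ((c :: rest).length - (i + 1)) (by simp only [List.length_cons] at hlen hi ⊢; omega)
            (List.drop (i + 1) (c :: rest))
            (PySem.Set.discard ws (String.ofList ((c :: rest).take (i + 1))))
            (by simp) (hnd.filter _)]
        exact hrec

-- ===== B-side: chains of matched words =====

-- pvChain cs k i rem: from state (i, rem) one reaches (cs.length, ∅) in exactly k matches
def pvChain (cs : List Char) : Nat → Nat → List String → Prop
  | 0, i, rem => i = cs.length ∧ rem = []
  | k + 1, i, rem => ∃ j, i < j ∧ j ≤ cs.length ∧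
      String.ofList ((cs.drop i).take (j - i)) ∈ rem ∧
      pvChain cs k j (PySem.Set.diff rem [String.ofList ((cs.drop i).take (j - i))])

theorem pv_mem_inner (cs : List Char) (i : Nat) (rem : List String) :
    ∀ (js : List Nat) (acc : List (Nat × List String)) (x : Nat × List String),
      (x ∈ js.foldl (fun acc j =>
        if PySem.Set.contains rem (String.ofList ((cs.drop i).take (j - i))) then
          PySem.Set.add acc (j, PySem.Set.diff rem [String.ofList ((cs.drop i).take (j - i))])
        else acc) acc ↔
      x ∈ acc ∨ ∃ j ∈ js, String.ofList ((cs.drop i).take (j - i)) ∈ rem ∧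
        x = (j, PySem.Set.diff rem [String.ofList ((cs.drop i).take (j - i))])) := by
  intro js
  induction js with
  | nil => simp
  | cons j js ih =>
    intro acc x
    simp only [List.foldl_cons]
    by_cases hc : PySem.Set.contains rem (String.ofList ((cs.drop i).take (j - i))) = true
    · rw [if_pos hc, ih]
      have hm := (pv_contains_iff _ _).1 hc
      rw [PySem.Set.mem_add]
      constructor
      · rintro (⟨h | h⟩ | ⟨j', hj', hmm, hx⟩)
        · exact Or.inl h
        · exact Or.inr ⟨j, by simp, hm, h⟩
        · exact Or.inr ⟨j', by simp [hj'], hmm, hx⟩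
      · rintro (h | ⟨j', hj', hmm, hx⟩)
        · exact Or.inl (Or.inl h)
        · rcases List.mem_cons.1 hj' with rfl | hj'
          · exact Or.inl (Or.inr hx)
          · exact Or.inr ⟨j', hj', hmm, hx⟩
    · rw [if_neg hc, ih]
      have hm : String.ofList ((cs.drop i).take (j - i)) ∉ rem :=
        fun h => hc ((pv_contains_iff _ _).2 h)
      constructor
      · rintro (h | ⟨j', hj', hmm, hx⟩)
        · exact Or.inl h
        · exact Or.inr ⟨j', by simp [hj'], hmm, hx⟩
      · rintro (h | ⟨j', hj', hmm, hx⟩)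
        · exact Or.inl h
        · rcases List.mem_cons.1 hj' with rfl | hj'
          · exact absurd hmm hm
          · exact Or.inr ⟨j', hj', hmm, hx⟩

theorem pv_mem_step (cs : List Char) (st : List (Nat × List String)) (x : Nat × List String) :
    x ∈ pvStep cs st ↔ ∃ ir ∈ st, ∃ j, ir.1 < j ∧ j ≤ cs.length ∧
      String.ofList ((cs.drop ir.1).take (j - ir.1)) ∈ ir.2 ∧
      x = (j, PySem.Set.diff ir.2 [String.ofList ((cs.drop ir.1).take (j - ir.1))]) := by
  unfold pvStep
  suffices h : ∀ (st : List (Nat × List String)) (acc : List (Nat × List String)),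
      (x ∈ st.foldl (fun acc ir =>
        (List.range' (ir.1 + 1) (cs.length - ir.1)).foldl (fun acc j =>
          if PySem.Set.contains ir.2 (String.ofList ((cs.drop ir.1).take (j - ir.1))) then
            PySem.Set.add acc (j, PySem.Set.diff ir.2 [String.ofList ((cs.drop ir.1).take (j - ir.1))])
          else acc) acc) acc ↔
      x ∈ acc ∨ ∃ ir ∈ st, ∃ j, ir.1 < j ∧ j ≤ cs.length ∧
        String.ofList ((cs.drop ir.1).take (j - ir.1)) ∈ ir.2 ∧
        x = (j, PySem.Set.diff ir.2 [String.ofList ((cs.drop ir.1).take (j - ir.1))])) by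
    rw [h st []]
    simp
  intro st
  induction st with
  | nil => simp
  | cons ir st ih =>
    intro acc
    simp only [List.foldl_cons]
    rw [ih, pv_mem_inner cs ir.1 ir.2]
    have hrange : ∀ j : Nat, j ∈ List.range' (ir.1 + 1) (cs.length - ir.1) ↔
        ir.1 < j ∧ j ≤ cs.length := by
      intro j
      rw [List.mem_range'_1]
      omega
    constructor
    · rintro (⟨h | ⟨j, hj, hmm, hx⟩⟩ | ⟨ir', hir', rest⟩)
      · exact Or.inl h
      · rcases (hrange j).1 hj with ⟨h1, h2⟩
        exact Or.inr ⟨ir, by simp, j, h1, h2, hmm, hx⟩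
      · exact Or.inr ⟨ir', by simp [hir'], rest⟩
    · rintro (h | ⟨ir', hir', j, h1, h2, hmm, hx⟩)
      · exact Or.inl (Or.inl h)
      · rcases List.mem_cons.1 hir' with rfl | hir'
        · exact Or.inl (Or.inr ⟨j, (hrange j).2 ⟨h1, h2⟩, hmm, hx⟩)
        · exact Or.inr ⟨ir', hir', j, h1, h2, hmm, hx⟩

theorem pv_mem_iter (cs : List Char) : ∀ (k : Nat) (st : List (Nat × List String)),
    ((cs.length, ([] : List String)) ∈ (pvStep cs)^[k] st ↔
      ∃ ir ∈ st, pvChain cs k ir.1 ir.2) := by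
  intro k
  induction k with
  | zero =>
    intro st
    simp only [Function.iterate_zero, id_eq, pvChain]
    constructor
    · intro h
      exact ⟨(cs.length, []), h, rfl, rfl⟩
    · rintro ⟨⟨i, rem⟩, hin, h1, h2⟩
      simp only at h1 h2
      subst h1; subst h2
      exact hin
  | succ k ih =>
    intro st
    rw [Function.iterate_succ_apply, ih (pvStep cs st)]
    constructor
    · rintro ⟨ir', hir', hch⟩
      rcases (pv_mem_step cs st ir').1 hir' with ⟨ir, hin, j, h1, h2, hmm, hx⟩
      subst hx
      exact ⟨ir, hin, j, h1, h2, hmm, hch⟩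
    · rintro ⟨ir, hin, j, h1, h2, hmm, hch⟩
      refine ⟨(j, PySem.Set.diff ir.2 [String.ofList ((cs.drop ir.1).take (j - ir.1))]),
        (pv_mem_step cs st _).2 ⟨ir, hin, j, h1, h2, hmm, rfl⟩, hch⟩

theorem pv_diff_len {rem : List String} {p : String} (hp : p ∈ rem) (hnd : rem.Nodup) :
    (PySem.Set.diff rem [p]).length = rem.length - 1 := by
  rw [pv_diff_eq_discard]
  have hfe : PySem.Set.discard rem p = rem.erase p := by
    rw [hnd.erase_eq_filter p]; rfl
  rw [hfe, List.length_erase_of_mem hp]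

theorem pv_diff_nodup {rem : List String} (p : String) (hnd : rem.Nodup) :
    (PySem.Set.diff rem [p]).Nodup := hnd.filter _

-- the split recursion equals chain-reachability
theorem pv_split_chain (cs : List Char) : ∀ (k : Nat) (rem : List String), rem.length = k →
    rem.Nodup → ∀ i, i ≤ cs.length →
    (pvSplit (cs.drop i) rem = true ↔ pvChain cs k i rem) := by
  intro k
  induction k with
  | zero =>
    intro rem hlen hnd i hi
    have hrem : rem = [] := List.length_eq_zero_iff.1 hlen
    subst hrem
    by_cases hd : cs.drop i = []
    · have hi' : i = cs.length := by
        have := List.drop_eq_nil_iff.1 hd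
        omega
      rw [hd]
      simp [pvSplit, pvChain, hi']
    · have hi' : i ≠ cs.length := by
        intro h; subst h; simp at hd
      rw [pvSplit, dif_neg hd]
      constructor
      · intro h
        rw [List.any_eq_true] at h
        rcases h with ⟨⟨t, ht⟩, -, hb⟩
        simp only at hb
        split at hb
        · exact absurd ((pv_contains_iff [] _).1 (by assumption)) (by simp)
        · simp at hb
      · rintro ⟨h1, -⟩
        exact absurd h1 hi'
  | succ k ih =>
    intro rem hlen hnd i hi
    have hrem : rem ≠ [] := by
      intro h; subst h; simp at hlen
    by_cases hd : cs.drop i = []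
    · have hi' : i = cs.length := by
        have := List.drop_eq_nil_iff.1 hd
        omega
      rw [hd]
      rw [pvSplit]
      constructor
      · intro h
        exact absurd (List.isEmpty_iff.1 h) hrem
      · rintro ⟨j, h1, h2, -⟩
        omega
    · rw [pv_alt_iff hd rem]
      constructor
      · rintro ⟨t, ht, hmm, hrec⟩
        rw [List.length_drop] at ht
        refine ⟨i + t + 1, by omega, by omega, ?_, ?_⟩
        · have : i + t + 1 - i = t + 1 := by omega
          rw [this]
          exact hmm
        · have hj : i + t + 1 - i = t + 1 := by omega
          rw [hj]
          have hdd : (cs.drop i).drop (t + 1) = cs.drop (i + t + 1) := by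
            rw [List.drop_drop]; ring_nf
          rw [← ih (PySem.Set.diff rem [String.ofList ((cs.drop i).take (t + 1))])
               (by rw [pv_diff_len hmm hnd]; omega)
               (pv_diff_nodup _ hnd) (i + t + 1) (by omega)]
          rw [← hdd]
          exact hrec
      · rintro ⟨j, h1, h2, hmm, hch⟩
        refine ⟨j - i - 1, by rw [List.length_drop]; omega, ?_, ?_⟩
        · have : j - i - 1 + 1 = j - i := by omega
          rw [this]
          exact hmm
        · have he : j - i - 1 + 1 = j - i := by omega
          rw [he]
          have hdd : (cs.drop i).drop (j - i) = cs.drop j := by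
            rw [List.drop_drop]
            congr 1
            omega
          rw [hdd]
          rw [ih (PySem.Set.diff rem [String.ofList ((cs.drop i).take (j - i))])
               (by rw [pv_diff_len hmm hnd]; omega)
               (pv_diff_nodup _ hnd) j h2]
          exact hch

theorem pv_foldl_iterate {α : Type} (f : α → α) : ∀ (k : Nat) (a : α),
    (List.range k).foldl (fun x _ => f x) a = f^[k] a := by
  intro k
  induction k with
  | zero => intro a; simp
  | succ k ih =>
    intro a
    rw [List.range_succ, List.foldl_append, ih]
    simp [Function.iterate_succ_apply']

-- ===== VERDICT (by name: the statement is the Claim_ definition above) =====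
theorem check_spec : Claim_equal_check := by
  intro s words _ hpre
  unfold Spec_check check check_alt
  have hnd : words.Nodup := hpre
  simp only [PySem.Set.ofList_eq_self_of_nodup words hnd]
  rw [pv_main s.toList.length s.toList words rfl hpre, pv_foldl_iterate]
  rw [Bool.eq_iff_iff, PySem.Set.contains_iff, pv_mem_iter s.toList words.length [(0, words)]]
  have hsplit := pv_split_chain s.toList words.length words rfl hpre 0 (Nat.zero_le _)
  rw [List.drop_zero] at hsplit
  rw [hsplit]
  constructor
  · intro h
    exact ⟨(0, words), by simp, h⟩
  · rintro ⟨⟨i, rem⟩, hin, hch⟩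
    simp only [List.mem_singleton, Prod.mk.injEq] at hin
    obtain ⟨rfl, rfl⟩ := hin
    exact hch
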